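-- pv_equiv track=rewrite | github.com/KSH23/algorithm_practice | BOJ/2563.py | paper_area
-- ===== SOURCE A (Python) =====
-- def paper_area(paper):
--     count = 0    # 영역을 세는 변수
--     grid = []    # 100x100 크기의 도화지
--
--     # 도화지를 모두 0으로 채움
--     for i in range(100):
--         temp_grid = []
--         for j in range(100):
--             temp_grid.append(0)
--         grid.append(temp_grid)
--
--     # 각 좌표를 돌며 색종이가 붙으면 1로 바꿔주고 영역을 셈
--     for p in paper:
--         for i in range(p[1], p[1] + 10):
--             for j in range(p[0], p[0] + 10):
--                 if grid[i][j] == 0: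
--                     grid[i][j] = 1
--                     count += 1
--
--     return count
-- ===== SOURCE B (Python) =====
-- def paper_area(paper):
--     # Row-sweep with interval merging: for each covered row, sort the x-starts of the
--     # papers spanning it; since all intervals have width 10 and are sorted, each next
--     # interval adds min(10, gap) new cells. No grid, no per-cell marking.
--     total = 0
--     rows = sorted({y + d for _, y in paper for d in range(10)})
--     for r in rows:
--         xs = sorted(x for x, y in paper if y <= r < y + 10)
--         total += 10
--         for a, b in zip(xs, xs[1:]):
--             total += min(10, b - a)
--     return total
-- ===== Notes on version B (the rewrite author's own statement) =====
-- stated objective: alternative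
-- what changed: Replaces A's pre-initialized 100x100 grid with per-cell '==0'-guarded marking and a running counter by a row sweep with interval merging: for each covered row it sorts the x-starts of the papers spanning it and, since all intervals have width 10, adds 10 for the first and min(10, gap) for each next interval; no grid and no per-cell work at all.
-- intended difference: On inputs where two papers' 10x10 blocks hit the same grid cell only via Python's negative-index wraparound (blocks overlapping after a +-100 shift in x and/or y), A merges those cells on the wrapped grid and returns a smaller count (e.g. 190 on [(-5,0),(86,0)]), while B returns the intended area of the union of the actual squares in the plane (200). — e.g. on paper_area([(-5, 0), (86, 0)]): A returns 190, B returns 200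
import Mathlib
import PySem

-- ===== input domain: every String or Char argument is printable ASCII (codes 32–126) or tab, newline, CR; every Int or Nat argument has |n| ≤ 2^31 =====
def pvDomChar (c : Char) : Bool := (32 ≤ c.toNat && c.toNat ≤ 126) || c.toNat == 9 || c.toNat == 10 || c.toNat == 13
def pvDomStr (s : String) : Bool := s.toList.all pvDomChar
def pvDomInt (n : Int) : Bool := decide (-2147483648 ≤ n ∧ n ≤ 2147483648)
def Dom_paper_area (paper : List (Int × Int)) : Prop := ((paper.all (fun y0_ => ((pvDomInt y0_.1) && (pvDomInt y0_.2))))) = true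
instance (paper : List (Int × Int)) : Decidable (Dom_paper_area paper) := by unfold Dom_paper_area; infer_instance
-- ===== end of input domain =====

-- B replaces A's marked 100x100 grid with a row sweep: for each covered row it sorts the
-- x-starts of the papers spanning it and sums merged-interval lengths (each next width-10
-- interval contributes min(10, gap)); on papers with negative coordinates A's count comes
-- from Python's negative-index wraparound into the grid (stated as D_ below).

-- ===== PORT A =====
-- one marking step of A: if grid[i][j] == 0 then grid[i][j] = 1; count += 1
def markCell (st : List (List Int) × Int) (i j : Int) : List (List Int) × Int :=
  if PySem.List.pyGetD (PySem.List.pyGetD st.1 i []) j 0 = 0 then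
    (PySem.List.pySetD st.1 i (PySem.List.pySetD (PySem.List.pyGetD st.1 i []) j 1), st.2 + 1)
  else st

def paper_area (paper : List (Int × Int)) : Int :=
  -- grid initialization: for i in range(100): temp=[]; for j in range(100): temp.append(0); grid.append(temp)
  let grid : List (List Int) :=
    (PySem.List.pyRange 0 100 1).foldl
      (fun g _ => g ++ [(PySem.List.pyRange 0 100 1).foldl (fun t _ => t ++ [(0 : Int)]) []]) []
  -- marking loop with the running counter
  let st := paper.foldl
    (fun st p =>
      (PySem.List.pyRange p.2 (p.2 + 10) 1).foldl
        (fun st i =>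
          (PySem.List.pyRange p.1 (p.1 + 10) 1).foldl (fun st j => markCell st i j) st)
        st)
    (grid, 0)
  st.2

-- ===== PORT B =====
def paper_area_alt (paper : List (Int × Int)) : Int :=
  -- rows = sorted({y + d for _, y in paper for d in range(10)})
  let rows : List Int :=
    PySem.List.sorted
      (PySem.Set.ofList (paper.flatMap (fun p => (PySem.List.pyRange 0 10 1).map (fun d => p.2 + d))))
      (fun r => r) false
  rows.foldl
    (fun total r =>
      -- xs = sorted(x for x, y in paper if y <= r < y + 10)
      let xs : List Int :=
        PySem.List.sorted
          ((paper.filter (fun p => decide (p.2 ≤ r) && decide (r < p.2 + 10))).map Prod.fst)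
          (fun x => x) false
      -- total += 10; for a, b in zip(xs, xs[1:]): total += min(10, b - a)
      (xs.zip xs.tail).foldl (fun t ab => t + min 10 (ab.2 - ab.1)) (total + 10))
    0

-- ===== PRECONDITION & SPEC =====
-- Pre_ is exactly the inputs on which the Python A returns normally: every coordinate in
-- [-100, 90]; outside it some grid index leaves [-100, 100) and A raises IndexError.
def Pre_paper_area (paper : List (Int × Int)) : Prop :=
  ∀ p ∈ paper, -100 ≤ p.1 ∧ p.1 ≤ 90 ∧ -100 ≤ p.2 ∧ p.2 ≤ 90
instance (paper : List (Int × Int)) : Decidable (Pre_paper_area paper) := by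
  unfold Pre_paper_area; infer_instance

def pvWitness_paper_area : (List (Int × Int)) := [(3, 7), (15, 7), (5, 2)]

-- On inputs where two papers' 10x10 blocks hit the same grid cell only through Python's
-- negative-index wraparound (their cell blocks overlap after shifting one by ±100 in x and/or y),
-- A merges those cells on the wrapped 100x100 grid and returns a smaller count, while B returns
-- the intended area of the union of the actual 10x10 squares in the plane.
def D_paper_area (paper : List (Int × Int)) : Prop :=
  ∃ p ∈ paper, ∃ q ∈ paper,
    (p.1 - q.1 + 9) % 100 ≤ 18 ∧ (p.2 - q.2 + 9) % 100 ≤ 18 ∧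
    ¬((p.1 - q.1).natAbs ≤ 9 ∧ (p.2 - q.2).natAbs ≤ 9)
instance (paper : List (Int × Int)) : Decidable (D_paper_area paper) := by
  unfold D_paper_area; infer_instance

def Spec_paper_area (paper : List (Int × Int)) (out : Int) : Prop :=
  ¬ D_paper_area paper → out = paper_area_alt paper
instance (paper : List (Int × Int)) (out : Int) : Decidable (Spec_paper_area paper out) := by
  unfold Spec_paper_area; infer_instance

def pvDiffWitness_paper_area : (List (Int × Int)) := [(-5, 0), (86, 0)]
def pvDiffWitnessOut_paper_area : Int × Int := (190, 200)

-- ===== CLAIM (what is proved, stated in full; the proofs are below) =====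
def Claim_unchanged_paper_area : Prop :=
  ∀ (paper : List (Int × Int)), Dom_paper_area paper → Pre_paper_area paper →
    Spec_paper_area paper (paper_area paper)
def Claim_changed_paper_area : Prop :=
  Dom_paper_area (pvDiffWitness_paper_area) ∧ Pre_paper_area (pvDiffWitness_paper_area) ∧
  D_paper_area (pvDiffWitness_paper_area) ∧
  paper_area (pvDiffWitness_paper_area) = pvDiffWitnessOut_paper_area.1 ∧
  paper_area_alt (pvDiffWitness_paper_area) = pvDiffWitnessOut_paper_area.2 ∧
  pvDiffWitnessOut_paper_area.1 ≠ pvDiffWitnessOut_paper_area.2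
def Claim_exact_paper_area : Prop :=
  ∀ (paper : List (Int × Int)), Dom_paper_area paper → Pre_paper_area paper →
    D_paper_area paper → paper_area paper ≠ paper_area_alt paper

-- ===== LEMMAS AND PROOFS =====

-- Python's negative-index wraparound for a 100-element list
def wrapI (t : Int) : Int := if t < 0 then t + 100 else t
def wrapC (c : Int × Int) : Int × Int := (wrapI c.1, wrapI c.2)

-- cell c lies in the 10x10 block of paper p
def CellOf (p c : Int × Int) : Prop :=
  p.1 ≤ c.1 ∧ c.1 < p.1 + 10 ∧ p.2 ≤ c.2 ∧ c.2 < p.2 + 10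

-- the set of WRAPPED cells marked by A, in marking order
def Aset (paper : List (Int × Int)) : PySem.Set (Int × Int) :=
  paper.foldl
    (fun t p =>
      (PySem.List.pyRange p.2 (p.2 + 10) 1).foldl
        (fun t i =>
          (PySem.List.pyRange p.1 (p.1 + 10) 1).foldl
            (fun t j => PySem.Set.add t (wrapI j, wrapI i)) t)
        t)
    PySem.Set.empty

-- the set of RAW plane cells covered by the papers, in marking order
def Bset (paper : List (Int × Int)) : PySem.Set (Int × Int) :=
  paper.foldl
    (fun s p =>
      (PySem.List.pyRange p.2 (p.2 + 10) 1).foldl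
        (fun s i =>
          (PySem.List.pyRange p.1 (p.1 + 10) 1).foldl (fun s j => PySem.Set.add s (j, i)) s)
        s)
    PySem.Set.empty

theorem pyGetD_wrap {α : Type} (xs : List α) (i : Int) (d : α) (hlen : xs.length = 100)
    (h1 : -100 ≤ i) (h2 : i < 100) :
    PySem.List.pyGetD xs i d = xs.getD (wrapI i).toNat d := by
  by_cases hi : 0 ≤ i
  · rw [PySem.List.pyGetD_of_nonneg _ _ hi]
    simp [wrapI, if_neg (by omega : ¬ i < 0)]
  · have hk : (100 - (-i).toNat) = (i + 100).toNat := by omega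
    simp only [PySem.List.pyGetD, PySem.List.pyGet?, PySem.List.pyIdx?, hlen,
      if_neg hi, if_pos (by omega : -((100 : Nat) : Int) ≤ i), hk, Option.bind, wrapI,
      if_pos (by omega : i < 0)]
    rw [List.getD_eq_getElem?_getD]

theorem pySetD_wrap {α : Type} (xs : List α) (i : Int) (v : α) (hlen : xs.length = 100)
    (h1 : -100 ≤ i) (h2 : i < 100) :
    PySem.List.pySetD xs i v = xs.set (wrapI i).toNat v := by
  by_cases hi : 0 ≤ i
  · rw [PySem.List.pySetD_of_nonneg _ _ hi]
    simp [wrapI, if_neg (by omega : ¬ i < 0)]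
  · have hk : (100 - (-i).toNat) = (i + 100).toNat := by omega
    simp only [PySem.List.pySetD, PySem.List.pySet?, PySem.List.pyIdx?, hlen,
      if_neg hi, if_pos (by omega : -((100 : Nat) : Int) ≤ i), hk, Option.map_some,
      Option.getD_some, wrapI, if_pos (by omega : i < 0)]

-- two folds over the same list preserve a relation preserved by each step
theorem rel_foldl {σ τ ρ : Type} (R : σ → τ → Prop) (f : σ → ρ → σ) (g : τ → ρ → τ)
    (xs : List ρ) (h : ∀ x ∈ xs, ∀ s t, R s t → R (f s x) (g t x)) :
    ∀ s t, R s t → R (xs.foldl f s) (xs.foldl g t) := by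
  induction xs with
  | nil => intro s t hst; simpa using hst
  | cons x xs ih =>
    intro s t hst
    simp only [List.foldl_cons]
    exact ih (fun y hy => h y (List.mem_cons_of_mem _ hy)) _ _
      (h x (List.mem_cons_self) s t hst)

-- a fold of the shape "append a constant" builds a replicate
theorem foldl_append_const {α β : Type} (xs : List β) (v : α) :
    ∀ acc : List α, xs.foldl (fun g _ => g ++ [v]) acc = acc ++ List.replicate xs.length v := by
  induction xs with
  | nil => intro acc; simp
  | cons x xs ih =>
    intro acc
    simp [ih, List.replicate_succ, List.append_assoc]

theorem grid_init_eq :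
    (PySem.List.pyRange 0 100 1).foldl
      (fun g _ => g ++ [(PySem.List.pyRange 0 100 1).foldl (fun t _ => t ++ [(0 : Int)]) []]) []
      = List.replicate 100 (List.replicate 100 (0 : Int)) := by
  rw [foldl_append_const, foldl_append_const]
  simp [PySem.List.length_pyRange_one]

-- invariant tying A's (grid, count) state to the set of wrapped cells marked so far
def AInv (g : List (List Int)) (c : Int) (t : PySem.Set (Int × Int)) : Prop :=
  c = (t.length : Int) ∧ g.length = 100 ∧
  (∀ k : Nat, k < 100 → (g.getD k []).length = 100) ∧
  (∀ a b : Int, 0 ≤ a → a < 100 → 0 ≤ b → b < 100 →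
    ((g.getD b.toNat []).getD a.toNat 0 = 0 ↔ (a, b) ∉ t))

theorem markCell_AInv (g : List (List Int)) (c : Int) (t : PySem.Set (Int × Int))
    (i j : Int) (hi0 : -100 ≤ i) (hi : i < 100) (hj0 : -100 ≤ j) (hj : j < 100)
    (h : AInv g c t) :
    AInv (markCell (g, c) i j).1 (markCell (g, c) i j).2 (PySem.Set.add t (wrapI j, wrapI i)) := by
  obtain ⟨hc, hlen, hrow, hcell⟩ := h
  have hwi : 0 ≤ wrapI i ∧ wrapI i < 100 := by unfold wrapI; split <;> omega
  have hwj : 0 ≤ wrapI j ∧ wrapI j < 100 := by unfold wrapI; split <;> omega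
  have hrl : (g.getD (wrapI i).toNat []).length = 100 := hrow _ (by omega)
  have hread : PySem.List.pyGetD (PySem.List.pyGetD g i []) j 0
      = (g.getD (wrapI i).toNat []).getD (wrapI j).toNat 0 := by
    rw [pyGetD_wrap g i [] hlen hi0 hi, pyGetD_wrap _ j 0 hrl hj0 hj]
  have hmem : (g.getD (wrapI i).toNat []).getD (wrapI j).toNat 0 = 0 ↔ (wrapI j, wrapI i) ∉ t :=
    hcell (wrapI j) (wrapI i) hwj.1 hwj.2 hwi.1 hwi.2
  by_cases hz : (g.getD (wrapI i).toNat []).getD (wrapI j).toNat 0 = 0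
  · -- cell unmarked: A marks and counts, the wrapped cell is new in t
    have hnot : (wrapI j, wrapI i) ∉ t := hmem.mp hz
    have hadd : PySem.Set.add t (wrapI j, wrapI i) = t ++ [(wrapI j, wrapI i)] := by
      simp [PySem.Set.add, PySem.Set.contains, hnot]
    have hwrite : PySem.List.pySetD g i
          (PySem.List.pySetD (PySem.List.pyGetD g i []) j 1)
        = g.set (wrapI i).toNat ((g.getD (wrapI i).toNat []).set (wrapI j).toNat 1) := by
      rw [pyGetD_wrap g i [] hlen hi0 hi, pySetD_wrap _ j 1 hrl hj0 hj,
        pySetD_wrap g i _ hlen hi0 hi]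
    refine ⟨?_, ?_, ?_, ?_⟩ <;>
      simp only [markCell, hread, hz, if_pos, hadd, hwrite]
    · simp [hc]
    · simp [hlen]
    · intro k hk
      rw [List.getD_eq_getElem _ _ (by rw [List.length_set, hlen]; omega),
        List.getElem_set (by rw [List.length_set, hlen]; omega)]
      by_cases hkk : (wrapI i).toNat = k
      · simp only [if_pos hkk, List.length_set]
        exact hrl
      · simp only [if_neg hkk]
        rw [← List.getD_eq_getElem _ _ (by omega)]
        exact hrow k hk
    · intro a b ha0 ha hb0 hb
      have houter : (g.set (wrapI i).toNat ((g.getD (wrapI i).toNat []).set (wrapI j).toNat 1)).getD b.toNat ([] : List Int)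
          = if (wrapI i).toNat = b.toNat then (g.getD (wrapI i).toNat []).set (wrapI j).toNat 1
            else g.getD b.toNat [] := by
        rw [List.getD_eq_getElem _ _ (by rw [List.length_set, hlen]; omega),
          List.getElem_set (by rw [List.length_set, hlen]; omega)]
        by_cases hbb : (wrapI i).toNat = b.toNat
        · rw [if_pos hbb, if_pos hbb]
        · rw [if_neg hbb, if_neg hbb, ← List.getD_eq_getElem _ _ (by omega)]
      rw [houter]
      by_cases hbb : (wrapI i).toNat = b.toNat
      · have hbe : wrapI i = b := by omega
        rw [if_pos hbb, List.getD_eq_getElem _ _ (by rw [List.length_set, hrl]; omega),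
          List.getElem_set (by rw [List.length_set, hrl]; omega)]
        by_cases haa : (wrapI j).toNat = a.toNat
        · have hae : wrapI j = a := by omega
          subst hae hbe
          simp
        · have hne : wrapI j ≠ a := by omega
          rw [if_neg haa, ← List.getD_eq_getElem _ _ (by rw [hrl]; omega), hbe,
            hcell a b ha0 ha hb0 hb]
          simp [List.mem_append, Prod.ext_iff, Ne.symm hne]
      · have hne : wrapI i ≠ b := by omega
        rw [if_neg hbb, hcell a b ha0 ha hb0 hb]
        simp [List.mem_append, Prod.ext_iff, Ne.symm hne]
  · -- cell already marked: the wrapped cell is already in t, both sides unchanged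
    have hin : (wrapI j, wrapI i) ∈ t := by
      by_contra hnot; exact hz (hmem.mpr hnot)
    have hadd : PySem.Set.add t (wrapI j, wrapI i) = t := by
      simp [PySem.Set.add, PySem.Set.contains, hin]
    rw [hadd]
    simp only [markCell, hread, if_neg hz]
    exact ⟨hc, hlen, hrow, hcell⟩

theorem ainv_init : AInv (List.replicate 100 (List.replicate 100 (0 : Int))) 0 PySem.Set.empty := by
  refine ⟨by simp [PySem.Set.empty], by simp, ?_, ?_⟩
  · intro k hk
    rw [List.getD_replicate _ (by omega)]
    simp
  · intro a b ha0 ha hb0 hb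
    rw [List.getD_replicate _ (by omega), List.getD_replicate _ (by omega)]
    simp [PySem.Set.empty]

-- A's return value is the number of distinct WRAPPED cells, on all of Pre_
theorem A_eq (paper : List (Int × Int)) (hpre : Pre_paper_area paper) :
    paper_area paper = PySem.Set.len (Aset paper) := by
  unfold paper_area Aset
  rw [grid_init_eq]
  have key := rel_foldl (σ := List (List Int) × Int) (τ := PySem.Set (Int × Int))
    (R := fun st t => AInv st.1 st.2 t)
    (f := fun st p =>
      (PySem.List.pyRange p.2 (p.2 + 10) 1).foldl
        (fun st i =>
          (PySem.List.pyRange p.1 (p.1 + 10) 1).foldl (fun st j => markCell st i j) st)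
        st)
    (g := fun t p =>
      (PySem.List.pyRange p.2 (p.2 + 10) 1).foldl
        (fun t i =>
          (PySem.List.pyRange p.1 (p.1 + 10) 1).foldl
            (fun t j => PySem.Set.add t (wrapI j, wrapI i)) t)
        t)
    (xs := paper) ?_ (List.replicate 100 (List.replicate 100 (0 : Int)), 0)
    PySem.Set.empty ainv_init
  · rw [key.1]
    simp [PySem.Set.len]
  · intro p hp st t hst
    obtain ⟨hx0, hx1, hy0, hy1⟩ := hpre p hp
    refine rel_foldl (R := fun st t => AInv st.1 st.2 t) _ _ _ ?_ st t hst
    intro i hi st t hst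
    have hib : p.2 ≤ i ∧ i < p.2 + 10 := (PySem.List.mem_pyRange_one).mp hi
    refine rel_foldl (R := fun st t => AInv st.1 st.2 t) _ _ _ ?_ st t hst
    intro j hj st t hst
    have hjb : p.1 ≤ j ∧ j < p.1 + 10 := (PySem.List.mem_pyRange_one).mp hj
    have := markCell_AInv st.1 st.2 t i j (by omega) (by omega) (by omega) (by omega) hst
    simpa using this

-- the wrapped set is the image of the raw set under wrapC, deduplicated in order
theorem Aset_eq_ofList_map (paper : List (Int × Int)) :
    Aset paper = PySem.Set.ofList ((Bset paper).map wrapC) := by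
  unfold Aset Bset
  have key := rel_foldl (σ := PySem.Set (Int × Int)) (τ := PySem.Set (Int × Int))
    (R := fun t s => t = PySem.Set.ofList (s.map wrapC))
    (f := fun t p =>
      (PySem.List.pyRange p.2 (p.2 + 10) 1).foldl
        (fun t i =>
          (PySem.List.pyRange p.1 (p.1 + 10) 1).foldl
            (fun t j => PySem.Set.add t (wrapI j, wrapI i)) t)
        t)
    (g := fun s p =>
      (PySem.List.pyRange p.2 (p.2 + 10) 1).foldl
        (fun s i =>
          (PySem.List.pyRange p.1 (p.1 + 10) 1).foldl (fun s j => PySem.Set.add s (j, i)) s)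
        s)
    (xs := paper) ?_ PySem.Set.empty PySem.Set.empty (by simp [PySem.Set.empty, PySem.Set.ofList])
  · exact key
  · intro p _ t s hst
    refine rel_foldl (R := fun t s => t = PySem.Set.ofList (s.map wrapC)) _ _ _ ?_ t s hst
    intro i _ t s hst
    refine rel_foldl (R := fun t s => t = PySem.Set.ofList (s.map wrapC)) _ _ _ ?_ t s hst
    intro j _ t s hst
    subst hst
    by_cases hin : (j, i) ∈ s
    · have h1 : PySem.Set.add s (j, i) = s := by
        simp [PySem.Set.add, PySem.Set.contains, hin]
      have h2 : (wrapI j, wrapI i) ∈ PySem.Set.ofList (s.map wrapC) := by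
        rw [PySem.Set.mem_ofList]
        exact List.mem_map.mpr ⟨(j, i), hin, rfl⟩
      have h3 : PySem.Set.add (PySem.Set.ofList (s.map wrapC)) (wrapI j, wrapI i)
          = PySem.Set.ofList (s.map wrapC) := by
        simp [PySem.Set.add, PySem.Set.contains, h2]
      rw [h1, h3]
    · have h1 : PySem.Set.add s (j, i) = s ++ [(j, i)] := by
        simp [PySem.Set.add, PySem.Set.contains, hin]
      rw [h1]
      have : (s ++ [(j, i)]).map wrapC = s.map wrapC ++ [(wrapI j, wrapI i)] := by
        simp [wrapC]
      rw [this, PySem.Set.ofList_append_singleton]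

-- the raw set is duplicate-free and every member lies in some paper's block
theorem Bset_props (paper : List (Int × Int)) :
    (Bset paper).Nodup ∧ ∀ c ∈ Bset paper, ∃ p ∈ paper, CellOf p c := by
  unfold Bset
  have key := rel_foldl (σ := PySem.Set (Int × Int)) (τ := PySem.Set (Int × Int))
    (R := fun s s' => s = s' ∧ s.Nodup ∧ ∀ c ∈ s, ∃ p ∈ paper, CellOf p c)
    (f := fun s p =>
      (PySem.List.pyRange p.2 (p.2 + 10) 1).foldl
        (fun s i =>
          (PySem.List.pyRange p.1 (p.1 + 10) 1).foldl (fun s j => PySem.Set.add s (j, i)) s)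
        s)
    (g := fun s p =>
      (PySem.List.pyRange p.2 (p.2 + 10) 1).foldl
        (fun s i =>
          (PySem.List.pyRange p.1 (p.1 + 10) 1).foldl (fun s j => PySem.Set.add s (j, i)) s)
        s)
    (xs := paper) ?_ PySem.Set.empty PySem.Set.empty
    ⟨rfl, by simp [PySem.Set.empty], by simp [PySem.Set.empty]⟩
  · exact ⟨key.2.1, key.2.2⟩
  · intro p hp s s' hst
    refine rel_foldl (R := fun s s' => s = s' ∧ s.Nodup ∧ ∀ c ∈ s, ∃ q ∈ paper, CellOf q c)
      _ _ _ ?_ s s' hst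
    intro i hi s s' hst
    have hib : p.2 ≤ i ∧ i < p.2 + 10 := (PySem.List.mem_pyRange_one).mp hi
    refine rel_foldl (R := fun s s' => s = s' ∧ s.Nodup ∧ ∀ c ∈ s, ∃ q ∈ paper, CellOf q c)
      _ _ _ ?_ s s' hst
    intro j hj s s' hst
    have hjb : p.1 ≤ j ∧ j < p.1 + 10 := (PySem.List.mem_pyRange_one).mp hj
    obtain ⟨rfl, hnd, hsub⟩ := hst
    refine ⟨rfl, PySem.Set.nodup_add s (j, i) hnd, ?_⟩
    intro c hc
    rcases (PySem.Set.mem_add s (j, i) c).mp hc with hc | hc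
    · exact hsub c hc
    · exact ⟨p, hp, by subst hc; exact ⟨hjb.1, hjb.2, hib.1, hib.2⟩⟩

-- a fold of "add" steps never loses members
theorem foldl_mem_mono {alpha rho : Type} (f : List alpha → rho → List alpha)
    (hf : ∀ s x c, c ∈ s → c ∈ f s x) :
    ∀ (xs : List rho) (s : List alpha) (c : alpha), c ∈ s → c ∈ xs.foldl f s := by
  intro xs
  induction xs with
  | nil => intro s c hc; simpa using hc
  | cons x xs ih => intro s c hc; exact ih _ _ (hf s x c hc)

-- every cell of a listed paper's 10x10 block ends up in the raw set
theorem mem_Bset (paper : List (Int × Int)) (p : Int × Int) (hp : p ∈ paper)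
    (i j : Int) (hi : i ∈ PySem.List.pyRange p.2 (p.2 + 10) 1)
    (hj : j ∈ PySem.List.pyRange p.1 (p.1 + 10) 1) :
    (j, i) ∈ Bset paper := by
  unfold Bset
  obtain ⟨l1, l2, rfl⟩ := List.append_of_mem hp
  rw [List.foldl_append, List.foldl_cons]
  refine foldl_mem_mono _ ?_ l2 _ _ ?_
  · intro s x c hc
    refine foldl_mem_mono _ ?_ _ _ _ hc
    intro s x c hc
    refine foldl_mem_mono _ ?_ _ _ _ hc
    intro s x c hc
    exact (PySem.Set.mem_add _ _ _).mpr (Or.inl hc)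
  · obtain ⟨m1, m2, hsplit⟩ := List.append_of_mem hi
    rw [hsplit, List.foldl_append, List.foldl_cons]
    refine foldl_mem_mono _ ?_ m2 _ _ ?_
    · intro s x c hc
      refine foldl_mem_mono _ ?_ _ _ _ hc
      intro s x c hc
      exact (PySem.Set.mem_add _ _ _).mpr (Or.inl hc)
    · obtain ⟨k1, k2, hsplit2⟩ := List.append_of_mem hj
      rw [hsplit2, List.foldl_append, List.foldl_cons]
      refine foldl_mem_mono _ ?_ k2 _ _ ?_
      · intro s x c hc
        exact (PySem.Set.mem_add _ _ _).mpr (Or.inl hc)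
      · exact (PySem.Set.mem_add _ _ _).mpr (Or.inr rfl)

-- deduplicating the image of a non-injective map strictly shrinks a duplicate-free list
theorem ofList_map_lt (s : List (Int × Int)) (hnd : s.Nodup) (c1 c2 : Int × Int)
    (h1 : c1 ∈ s) (h2 : c2 ∈ s) (hne : c1 ≠ c2) (hw : wrapC c1 = wrapC c2) :
    (PySem.Set.ofList (s.map wrapC)).length < s.length := by
  have e1 : (PySem.Set.ofList (s.map wrapC)).toFinset = (s.map wrapC).toFinset := by
    ext x; simp [PySem.Set.mem_ofList]
  have e2 : (PySem.Set.ofList (s.map wrapC)).length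
      = (PySem.Set.ofList (s.map wrapC)).toFinset.card :=
    (List.toFinset_card_of_nodup (PySem.Set.nodup_ofList _)).symm
  have e3 : s.length = s.toFinset.card := (List.toFinset_card_of_nodup hnd).symm
  have e4 : (s.map wrapC).toFinset = s.toFinset.image wrapC := by
    ext x; simp
  rw [e2, e1, e3, e4]
  refine lt_of_le_of_ne Finset.card_image_le ?_
  intro heq
  exact hne (Finset.card_image_iff.mp heq (List.mem_toFinset.mpr h1) (List.mem_toFinset.mpr h2) hw)

theorem wrapI_eq_of_diff (a b : Int) (ha0 : -100 ≤ a) (ha : a < 100)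
    (hb0 : -100 ≤ b) (hb : b < 100) (h : a - b = -100 ∨ a - b = 0 ∨ a - b = 100) :
    wrapI a = wrapI b := by
  unfold wrapI; split_ifs <;> omega

-- without a wrap collision, wrapC is injective on the covered cells
theorem wrapC_inj (paper : List (Int × Int)) (hpre : Pre_paper_area paper)
    (hnd : ¬ D_paper_area paper)
    (c1 c2 : Int × Int) (p q : Int × Int) (hp : p ∈ paper) (hq : q ∈ paper)
    (h1 : CellOf p c1) (h2 : CellOf q c2) (hw : wrapC c1 = wrapC c2) : c1 = c2 := by
  obtain ⟨hp1, hp2, hp3, hp4⟩ := hpre p hp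
  obtain ⟨hq1, hq2, hq3, hq4⟩ := hpre q hq
  obtain ⟨ha1, ha2, ha3, ha4⟩ := h1
  obtain ⟨hb1, hb2, hb3, hb4⟩ := h2
  have hwx : wrapI c1.1 = wrapI c2.1 := congrArg Prod.fst hw
  have hwy : wrapI c1.2 = wrapI c2.2 := congrArg Prod.snd hw
  have hdx : c1.1 - c2.1 = -100 ∨ c1.1 - c2.1 = 0 ∨ c1.1 - c2.1 = 100 := by
    simp only [wrapI] at hwx; split_ifs at hwx <;> omega
  have hdy : c1.2 - c2.2 = -100 ∨ c1.2 - c2.2 = 0 ∨ c1.2 - c2.2 = 100 := by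
    simp only [wrapI] at hwy; split_ifs at hwy <;> omega
  by_contra hne
  apply hnd
  have hne' : c1.1 ≠ c2.1 ∨ c1.2 ≠ c2.2 := by
    by_contra h
    push_neg at h
    exact hne (Prod.ext_iff.mpr ⟨h.1, h.2⟩)
  refine ⟨p, hp, q, hq, ?_, ?_, ?_⟩
  · rcases hdx with h | h | h <;> omega
  · rcases hdy with h | h | h <;> omega
  · rintro ⟨hna, hnb⟩
    rcases hne' with h | h
    · rcases hdx with h' | h' | h' <;> omega
    · rcases hdy with h' | h' | h' <;> omega

-- ---------- B-side: the row sweep counts the raw covered cells ----------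

-- the union of the width-10 intervals starting at the entries of xs, as a Finset
def F (xs : List Int) : Finset Int :=
  (xs.flatMap (fun x => (PySem.List.pyRange 0 10 1).map (fun d => x + d))).toFinset

theorem mem_F (xs : List Int) (t : Int) :
    t ∈ F xs ↔ ∃ x ∈ xs, x ≤ t ∧ t < x + 10 := by
  constructor
  · intro h
    rw [F, List.mem_toFinset, List.mem_flatMap] at h
    obtain ⟨x, hx, h⟩ := h
    rw [List.mem_map] at h
    obtain ⟨d, hd, rfl⟩ := h
    have hdb := PySem.List.mem_pyRange_one.mp hd
    exact ⟨x, hx, by omega, by omega⟩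
  · rintro ⟨x, hx, h1, h2⟩
    rw [F, List.mem_toFinset, List.mem_flatMap]
    exact ⟨x, hx, List.mem_map.mpr ⟨t - x, PySem.List.mem_pyRange_one.mpr ⟨by omega, by omega⟩, by omega⟩⟩

theorem F_cons (x : Int) (xs : List Int) :
    F (x :: xs) = Finset.Ico x (x + 10) ∪ F xs := by
  ext t
  simp only [mem_F, Finset.mem_union, Finset.mem_Ico, List.mem_cons]
  constructor
  · rintro ⟨z, rfl | hz, hb⟩
    · exact Or.inl hb
    · exact Or.inr ⟨z, hz, hb⟩
  · rintro (h | ⟨z, hz, hb⟩)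
    · exact ⟨x, Or.inl rfl, h⟩
    · exact ⟨z, Or.inr hz, hb⟩

theorem F_nil : F [] = ∅ := rfl

-- core merged-interval count: on a sorted nonempty list, card = 10 + sum of min(10, gap)
theorem card_F_sorted (x : Int) (xs : List Int)
    (hs : (x :: xs).Pairwise (· ≤ ·)) :
    ((F (x :: xs)).card : Int)
      = 10 + (((x :: xs).zip xs).map (fun ab => min 10 (ab.2 - ab.1))).sum := by
  induction xs generalizing x with
  | nil =>
    rw [F_cons, F_nil, Finset.union_empty, Int.card_Ico]
    simp
  | cons y xs ih =>
    have hxy : x ≤ y := (List.pairwise_cons.mp hs).1 y List.mem_cons_self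
    have hys : (y :: xs).Pairwise (· ≤ ·) := (List.pairwise_cons.mp hs).2
    have hyall : ∀ z ∈ y :: xs, y ≤ z := by
      intro z hz
      rcases List.mem_cons.mp hz with rfl | hz
      · exact le_refl z
      · exact (List.pairwise_cons.mp hys).1 z hz
    have hdiff : Finset.Ico x (x + 10) \ F (y :: xs) = Finset.Ico x (min (x + 10) y) := by
      ext t
      simp only [Finset.mem_sdiff, Finset.mem_Ico, mem_F, lt_min_iff]
      constructor
      · rintro ⟨⟨h1, h2⟩, hnot⟩
        refine ⟨h1, h2, ?_⟩
        by_contra h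
        exact hnot ⟨y, List.mem_cons_self, by omega, by omega⟩
      · rintro ⟨h1, h2, h3⟩
        refine ⟨⟨h1, h2⟩, ?_⟩
        rintro ⟨z, hz, hzt, htz⟩
        have := hyall z hz
        omega
    have hcard : (Finset.Ico x (min (x + 10) y)).card + (F (y :: xs)).card
        = (F (x :: y :: xs)).card := by
      rw [F_cons x (y :: xs), ← hdiff]
      exact Finset.card_sdiff_add_card _ _
    have hico : ((Finset.Ico x (min (x + 10) y)).card : Int) = min 10 (y - x) := by
      rw [Int.card_Ico]
      omega
    have hih := ih y hys
    have hzip : (((x :: y :: xs).zip (y :: xs)).map (fun ab => min 10 (ab.2 - ab.1))).sum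
        = min 10 (y - x) + (((y :: xs).zip xs).map (fun ab => min 10 (ab.2 - ab.1))).sum := by
      simp [List.zip_cons_cons]
    rw [hzip, ← hcard]
    push_cast
    omega

-- every covered plane cell is in Bset, and conversely
theorem mem_Bset_iff (paper : List (Int × Int)) (c : Int × Int) :
    c ∈ Bset paper ↔ ∃ p ∈ paper, CellOf p c := by
  constructor
  · exact fun hc => (Bset_props paper).2 c hc
  · rintro ⟨p, hp, h1, h2, h3, h4⟩
    have := mem_Bset paper p hp c.2 c.1
      ((PySem.List.mem_pyRange_one).mpr ⟨h3, h4⟩)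
      ((PySem.List.mem_pyRange_one).mpr ⟨h1, h2⟩)
    simpa using this

-- the sorted x-starts of the papers covering row r, and the sorted covered rows (as in B)
def rowXs (paper : List (Int × Int)) (r : Int) : List Int :=
  PySem.List.sorted
    ((paper.filter (fun p => decide (p.2 ≤ r) && decide (r < p.2 + 10))).map Prod.fst)
    (fun x => x) false

def rowsL (paper : List (Int × Int)) : List Int :=
  PySem.List.sorted
    (PySem.Set.ofList (paper.flatMap (fun p => (PySem.List.pyRange 0 10 1).map (fun d => p.2 + d))))
    (fun r => r) false

theorem mem_rowXs (paper : List (Int × Int)) (r x : Int) :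
    x ∈ rowXs paper r ↔ ∃ p ∈ paper, (p.2 ≤ r ∧ r < p.2 + 10) ∧ p.1 = x := by
  simp [rowXs, PySem.List.mem_sorted, List.mem_map, List.mem_filter, and_assoc]

theorem mem_rowsL (paper : List (Int × Int)) (r : Int) :
    r ∈ rowsL paper ↔ ∃ p ∈ paper, p.2 ≤ r ∧ r < p.2 + 10 := by
  simp only [rowsL, PySem.List.mem_sorted, PySem.Set.mem_ofList, List.mem_flatMap,
    List.mem_map, PySem.List.mem_pyRange_one]
  constructor
  · rintro ⟨p, hp, d, ⟨hd0, hd10⟩, rfl⟩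
    exact ⟨p, hp, by omega, by omega⟩
  · rintro ⟨p, hp, h1, h2⟩
    exact ⟨p, hp, r - p.2, ⟨by omega, by omega⟩, by omega⟩

-- the per-row contribution B computes: 10 plus the merged gaps
def termB (paper : List (Int × Int)) (r : Int) : Int :=
  10 + (((rowXs paper r).zip (rowXs paper r).tail).map (fun ab => min 10 (ab.2 - ab.1))).sum

theorem alt_eq_sum (paper : List (Int × Int)) :
    paper_area_alt paper = ((rowsL paper).map (termB paper)).sum := by
  show (rowsL paper).foldl
      (fun total r =>
        ((rowXs paper r).zip (rowXs paper r).tail).foldl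
          (fun t ab => t + min 10 (ab.2 - ab.1)) (total + 10))
      0 = _
  have h1 : (fun (total r : Int) =>
      ((rowXs paper r).zip (rowXs paper r).tail).foldl
        (fun t ab => t + min 10 (ab.2 - ab.1)) (total + 10))
      = fun total r => total + termB paper r := by
    funext total r
    rw [PySem.List.foldl_add]
    unfold termB
    ring
  rw [h1, PySem.List.foldl_add (g := termB paper)]
  simp

-- the row-r fiber of the covered cells is the merged-interval union of that row
theorem row_card (paper : List (Int × Int)) (r : Int) (hr : r ∈ rowsL paper) :
    ((((Bset paper).toFinset.filter (fun c => c.2 = r)).card : Nat) : Int) = termB paper r := by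
  have himg : (Bset paper).toFinset.filter (fun c => c.2 = r)
      = (F (rowXs paper r)).image (fun j => (j, r)) := by
    ext c
    simp only [Finset.mem_filter, List.mem_toFinset, Finset.mem_image, mem_F, mem_rowXs]
    constructor
    · rintro ⟨hc, hcr⟩
      obtain ⟨p, hp, h1, h2, h3, h4⟩ := (mem_Bset_iff paper c).mp hc
      refine ⟨c.1, ⟨p.1, ⟨p, hp, ⟨by omega, by omega⟩, rfl⟩, h1, h2⟩, ?_⟩
      rw [← hcr]
    · rintro ⟨j, ⟨xx, ⟨p, hp, hcov, rfl⟩, hb1, hb2⟩, rfl⟩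
      exact ⟨(mem_Bset_iff paper (j, r)).mpr ⟨p, hp, hb1, hb2, hcov.1, hcov.2⟩, rfl⟩
  rw [himg, Finset.card_image_of_injective _ (fun a b h => (Prod.ext_iff.mp h).1)]
  obtain ⟨p, hp, hcov⟩ := (mem_rowsL paper r).mp hr
  have hne : rowXs paper r ≠ [] := by
    intro h
    have : p.1 ∈ rowXs paper r := (mem_rowXs paper r p.1).mpr ⟨p, hp, hcov, rfl⟩
    rw [h] at this
    exact List.not_mem_nil this
  obtain ⟨x, xs', hx⟩ := List.exists_cons_of_ne_nil hne
  have hsort : (x :: xs').Pairwise (· ≤ ·) := by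
    have := PySem.List.sorted_pairwise
      ((paper.filter (fun p => decide (p.2 ≤ r) && decide (r < p.2 + 10))).map Prod.fst)
      (fun x => x)
    rw [show PySem.List.sorted
        ((paper.filter (fun p => decide (p.2 ≤ r) && decide (r < p.2 + 10))).map Prod.fst)
        (fun x => x) = rowXs paper r from rfl, hx] at this
    exact this
  rw [hx, card_F_sorted x xs' hsort]
  unfold termB
  rw [hx]
  rfl

-- B's return value is the number of distinct raw covered cells
theorem B_eq (paper : List (Int × Int)) :
    paper_area_alt paper = ((Bset paper).length : Int) := by
  have hnodupB : (Bset paper).Nodup := (Bset_props paper).1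
  have hnodupR : (rowsL paper).Nodup := by
    have hperm := PySem.List.sorted_perm
      (PySem.Set.ofList (paper.flatMap (fun p => (PySem.List.pyRange 0 10 1).map (fun d => p.2 + d))))
      (fun r : Int => r) false
    exact hperm.symm.nodup (PySem.Set.nodup_ofList _)
  have hmaps : Set.MapsTo (fun c : Int × Int => c.2)
      ((Bset paper).toFinset : Set (Int × Int)) ((rowsL paper).toFinset : Set Int) := by
    intro c hc
    obtain ⟨p, hp, _, _, h3, h4⟩ :=
      (mem_Bset_iff paper c).mp (List.mem_toFinset.mp (Finset.mem_coe.mp hc))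
    exact Finset.mem_coe.mpr (List.mem_toFinset.mpr ((mem_rowsL paper c.2).mpr ⟨p, hp, h3, h4⟩))
  have hcard := Finset.card_eq_sum_card_fiberwise hmaps
  calc paper_area_alt paper
      = ((rowsL paper).map (termB paper)).sum := alt_eq_sum paper
    _ = ∑ r ∈ (rowsL paper).toFinset, termB paper r :=
        (List.sum_toFinset (termB paper) hnodupR).symm
    _ = ∑ r ∈ (rowsL paper).toFinset,
          ((((Bset paper).toFinset.filter (fun c => c.2 = r)).card : Nat) : Int) :=
        Finset.sum_congr rfl (fun r hr => (row_card paper r (List.mem_toFinset.mp hr)).symm)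
    _ = (((Bset paper).toFinset.card : Nat) : Int) := by
        rw [hcard]
        push_cast
        rfl
    _ = ((Bset paper).length : Int) := by
        rw [List.toFinset_card_of_nodup hnodupB]

-- ===== VERDICT (by name: the statement is the Claim_ definition above) =====
theorem paper_area_spec : Claim_unchanged_paper_area := by
  intro paper _ hpre hnd
  rw [A_eq paper hpre, Aset_eq_ofList_map, B_eq paper]
  obtain ⟨hnd', hsub⟩ := Bset_props paper
  have hinj : ∀ x ∈ Bset paper, ∀ y ∈ Bset paper, wrapC x = wrapC y → x = y := by
    intro x hx y hy hw
    obtain ⟨p, hp, hxp⟩ := hsub x hx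
    obtain ⟨q, hq, hyq⟩ := hsub y hy
    exact wrapC_inj paper hpre hnd x y p q hp hq hxp hyq hw
  rw [PySem.Set.ofList_eq_self_of_nodup _ (List.Nodup.map_on hinj hnd')]
  simp [PySem.Set.len]

set_option maxRecDepth 40000 in
theorem paper_area_changed : Claim_changed_paper_area := by
  unfold Claim_changed_paper_area
  refine ⟨by decide, by decide, by decide, ?_, by decide, by decide⟩
  rw [show paper_area pvDiffWitness_paper_area
      = PySem.Set.len (Aset pvDiffWitness_paper_area) from A_eq _ (by decide)]
  decide

theorem paper_area_tight : Claim_exact_paper_area := by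
  intro paper _ hpre hD
  obtain ⟨p, hp, q, hq, hmx, hmy, hno⟩ := hD
  obtain ⟨hp1, hp2, hp3, hp4⟩ := hpre p hp
  obtain ⟨hq1, hq2, hq3, hq4⟩ := hpre q hq
  -- extract the wrap shifts from the mod-100 overlap conditions
  obtain ⟨dx, hdxv, h9x⟩ : ∃ dx : Int, (dx = -1 ∨ dx = 0 ∨ dx = 1) ∧
      (p.1 - q.1 - 100 * dx).natAbs ≤ 9 := by
    by_cases h : (p.1 - q.1).natAbs ≤ 9
    · exact ⟨0, Or.inr (Or.inl rfl), by omega⟩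
    · by_cases h' : 0 ≤ p.1 - q.1
      · exact ⟨1, Or.inr (Or.inr rfl), by omega⟩
      · exact ⟨-1, Or.inl rfl, by omega⟩
  obtain ⟨dy, hdyv, h9y⟩ : ∃ dy : Int, (dy = -1 ∨ dy = 0 ∨ dy = 1) ∧
      (p.2 - q.2 - 100 * dy).natAbs ≤ 9 := by
    by_cases h : (p.2 - q.2).natAbs ≤ 9
    · exact ⟨0, Or.inr (Or.inl rfl), by omega⟩
    · by_cases h' : 0 ≤ p.2 - q.2
      · exact ⟨1, Or.inr (Or.inr rfl), by omega⟩
      · exact ⟨-1, Or.inl rfl, by omega⟩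
  have hne0 : ¬(dx = 0 ∧ dy = 0) := by
    rintro ⟨rfl, rfl⟩
    exact hno ⟨by omega, by omega⟩
  have h9x' : -9 ≤ p.1 - q.1 - 100 * dx ∧ p.1 - q.1 - 100 * dx ≤ 9 := by omega
  have h9y' : -9 ≤ p.2 - q.2 - 100 * dy ∧ p.2 - q.2 - 100 * dy ≤ 9 := by omega
  -- a concrete pair of distinct raw cells that wrap to the same grid cell
  have hmem1 : (max p.1 (q.1 + 100 * dx), max p.2 (q.2 + 100 * dy)) ∈ Bset paper :=
    mem_Bset paper p hp _ _
      ((PySem.List.mem_pyRange_one).mpr (by constructor <;> omega))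
      ((PySem.List.mem_pyRange_one).mpr (by constructor <;> omega))
  have hmem2 : (max p.1 (q.1 + 100 * dx) - 100 * dx, max p.2 (q.2 + 100 * dy) - 100 * dy)
      ∈ Bset paper :=
    mem_Bset paper q hq _ _
      ((PySem.List.mem_pyRange_one).mpr (by constructor <;> omega))
      ((PySem.List.mem_pyRange_one).mpr (by constructor <;> omega))
  have hnecc : (max p.1 (q.1 + 100 * dx), max p.2 (q.2 + 100 * dy))
      ≠ (max p.1 (q.1 + 100 * dx) - 100 * dx, max p.2 (q.2 + 100 * dy) - 100 * dy) := by
    intro h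
    rw [Prod.ext_iff] at h
    apply hne0
    constructor <;> omega
  have hwrap : wrapC (max p.1 (q.1 + 100 * dx), max p.2 (q.2 + 100 * dy))
      = wrapC (max p.1 (q.1 + 100 * dx) - 100 * dx, max p.2 (q.2 + 100 * dy) - 100 * dy) := by
    unfold wrapC
    refine Prod.ext_iff.mpr ⟨?_, ?_⟩
    · exact wrapI_eq_of_diff _ _ (by omega) (by omega) (by omega) (by omega) (by omega)
    · exact wrapI_eq_of_diff _ _ (by omega) (by omega) (by omega) (by omega) (by omega)
  obtain ⟨hnd, _⟩ := Bset_props paper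
  have hlt := ofList_map_lt (Bset paper) hnd _ _ hmem1 hmem2 hnecc hwrap
  rw [A_eq paper hpre, Aset_eq_ofList_map, B_eq paper]
  simp only [PySem.Set.len]
  intro h
  omega
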